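-- pv_equiv track=rewrite | github.com/Alphaws/python_start | 07_07_sum_of_vowels.py | maganhangzok_osszege
-- ===== SOURCE A (Python) =====
-- def maganhangzok_osszege(szoveg: str) -> int:
--     """
--     Kiszámolja a szövegben található magánhangzók összegét.
--
--     Args:
--         szoveg: A feldolgozandó szöveg
--
--     Returns:
--         int: A magánhangzók számértékeinek összege
--     """
--     # Magánhangzók és értékeik definiálása
--     maganhangzo_ertekek = {
--         'a': 4,
--         'e': 3,
--         'i': 1,
--         'o': 0,
--         'u': 0
--     }
--
--     # Összeg inicializálása
--     osszeg = 0
--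
--     # Végigmegyünk a szövegen és összegezzük a magánhangzók értékeit
--     for karakter in szoveg.lower():
--         if karakter in maganhangzo_ertekek:
--             osszeg += maganhangzo_ertekek[karakter]
--
--     return osszeg
-- ===== SOURCE B (Python) =====
-- def maganhangzok_osszege(szoveg: str) -> int:
--     """Weighted-count formula: only a, e, i carry nonzero value (o, u score 0)."""
--     kis = szoveg.lower()
--     return 4 * kis.count('a') + 3 * kis.count('e') + kis.count('i')
-- ===== Notes on version B (the rewrite author's own statement) =====
-- stated objective: faster
-- what changed: B replaces A's per-character loop with dict membership/lookup by a closed arithmetic formula: a weighted sum of three str.count calls, dropping the dict and the zero-valued vowels entirely.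
import Mathlib
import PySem

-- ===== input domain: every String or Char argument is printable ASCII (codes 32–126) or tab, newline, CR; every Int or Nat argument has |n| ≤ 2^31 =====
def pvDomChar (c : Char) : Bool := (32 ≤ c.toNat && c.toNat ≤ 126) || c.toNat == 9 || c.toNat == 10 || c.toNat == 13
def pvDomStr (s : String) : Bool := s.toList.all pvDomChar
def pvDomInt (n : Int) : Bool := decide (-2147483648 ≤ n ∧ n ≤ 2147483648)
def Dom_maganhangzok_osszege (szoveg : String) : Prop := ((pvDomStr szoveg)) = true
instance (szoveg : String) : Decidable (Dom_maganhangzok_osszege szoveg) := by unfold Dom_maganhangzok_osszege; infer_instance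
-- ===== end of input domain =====

-- B replaces A's per-character dict-lookup loop by a closed weighted-count formula over three str.count calls; objective: faster (constant factor, measured).

-- ===== PORT A =====
-- A: for each lowered character, if it is a vowel key, add its dict value.
-- (d[karakter] is reached only when 'karakter in d' holds, so Dict.getD is exact here.)
def maganhangzok_osszege (szoveg : String) : Int :=
  let maganhangzo_ertekek : PySem.Dict Char Int :=
    PySem.Dict.ofList [('a', 4), ('e', 3), ('i', 1), ('o', 0), ('u', 0)]
  (PySem.Str.lower szoveg).toList.foldl
    (fun osszeg karakter =>
      if maganhangzo_ertekek.contains karakter then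
        osszeg + maganhangzo_ertekek.getD karakter 0
      else osszeg) 0

-- ===== PORT B =====
-- B: closed formula 4*count('a') + 3*count('e') + count('i') on the lowered string.
def maganhangzok_osszege_alt (szoveg : String) : Int :=
  let kis := PySem.Str.lower szoveg
  4 * (PySem.Str.count kis "a" : Int)
    + 3 * (PySem.Str.count kis "e" : Int)
    + (PySem.Str.count kis "i" : Int)

-- ===== PRECONDITION & SPEC =====
def Spec_maganhangzok_osszege (szoveg : String) (out : Int) : Prop := out = maganhangzok_osszege_alt szoveg
instance (szoveg : String) (out : Int) : Decidable (Spec_maganhangzok_osszege szoveg out) := by unfold Spec_maganhangzok_osszege; infer_instance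

-- ===== CLAIM (what is proved, stated in full; the proofs are below) =====
def Claim_equal_maganhangzok_osszege : Prop := ∀ (szoveg : String), Dom_maganhangzok_osszege szoveg → Spec_maganhangzok_osszege szoveg (maganhangzok_osszege szoveg)

-- ===== LEMMAS AND PROOFS =====

-- single-character substring count = character count
lemma chars_count_go_single (c : Char) (cs : List Char) (fuel : Nat) (acc : Nat)
    (h : cs.length ≤ fuel) :
    PySem.Chars.count.go [c] fuel cs acc = acc + cs.count c := by
  induction cs generalizing fuel acc with
  | nil => cases fuel <;> simp [PySem.Chars.count.go]
  | cons x t ih =>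
    cases fuel with
    | zero => simp at h
    | succ n =>
      have hn : t.length ≤ n := by simpa using h
      by_cases hx : c = x
      · subst hx
        simp [PySem.Chars.count.go, List.isPrefixOf, ih n (acc + 1) hn, List.count_cons]
        omega
      · have : ([c].isPrefixOf (x :: t)) = false := by
          simp [List.isPrefixOf]
          exact hx
        simp [PySem.Chars.count.go, this, ih n acc hn, List.count_cons, hx]
        exact fun h => hx h.symm

lemma chars_count_single (c : Char) (cs : List Char) :
    PySem.Chars.count cs [c] = cs.count c := by
  simp [PySem.Chars.count]
  simpa using chars_count_go_single c cs cs.length 0 le_rfl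

-- A's fold over any character list equals the weighted counts.
lemma foldA_eq (cs : List Char) (acc : Int) :
    cs.foldl
      (fun osszeg karakter =>
        if (PySem.Dict.ofList [('a', (4:Int)), ('e', 3), ('i', 1), ('o', 0), ('u', 0)]).contains karakter then
          osszeg + (PySem.Dict.ofList [('a', (4:Int)), ('e', 3), ('i', 1), ('o', 0), ('u', 0)]).getD karakter 0
        else osszeg) acc
    = acc + 4 * cs.count 'a' + 3 * cs.count 'e' + cs.count 'i' := by
  have hitems : (PySem.Dict.ofList [('a', (4:Int)), ('e', 3), ('i', 1), ('o', 0), ('u', 0)]).items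
      = [('a', (4:Int)), ('e', 3), ('i', 1), ('o', 0), ('u', 0)] := rfl
  induction cs generalizing acc with
  | nil => simp
  | cons x t ih =>
    simp only [List.foldl_cons, ih, List.count_cons]
    by_cases ha : x = 'a'
    · subst ha
      simp [PySem.Dict.contains, PySem.Dict.getD, PySem.Dict.get?, hitems]
      ring
    · by_cases he : x = 'e'
      · subst he
        simp [PySem.Dict.contains, PySem.Dict.getD, PySem.Dict.get?, hitems]
        ring
      · by_cases hi : x = 'i'
        · subst hi
          simp [PySem.Dict.contains, PySem.Dict.getD, PySem.Dict.get?, hitems]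
          ring
        · by_cases ho : x = 'o'
          · subst ho
            simp [PySem.Dict.contains, PySem.Dict.getD, PySem.Dict.get?, hitems, ha, he, hi]
          · by_cases hu : x = 'u'
            · subst hu
              simp [PySem.Dict.contains, PySem.Dict.getD, PySem.Dict.get?, hitems, ha, he, hi]
            · have hc : (PySem.Dict.ofList [('a', (4:Int)), ('e', 3), ('i', 1), ('o', 0), ('u', 0)]).contains x = false := by
                simp only [PySem.Dict.contains, hitems, List.any_eq_false]
                rintro p hp
                fin_cases hp <;> simp [beq_iff_eq] <;>
                  first
                  | exact fun h => ha h.symm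
                  | exact fun h => he h.symm
                  | exact fun h => hi h.symm
                  | exact fun h => ho h.symm
                  | exact fun h => hu h.symm
              simp [hc, ha, he, hi]

-- ===== VERDICT (by name: the statement is the Claim_ definition above) =====
theorem maganhangzok_osszege_spec : Claim_equal_maganhangzok_osszege := by
  intro szoveg _
  show maganhangzok_osszege szoveg = maganhangzok_osszege_alt szoveg
  rw [maganhangzok_osszege, maganhangzok_osszege_alt]
  simp only [PySem.Str.count_eq, foldA_eq]
  have ha : ("a" : String).toList = ['a'] := rfl
  have he : ("e" : String).toList = ['e'] := rfl
  have hi : ("i" : String).toList = ['i'] := rfl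
  simp only [ha, he, hi, chars_count_single]
  push_cast
  ring
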